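-- pv_equiv track=rewrite | github.com/lunarys/mqtt-device-controller | image/device-controller.py | topic_status_match
-- ===== SOURCE A (Python) =====
-- def topic_status_len(constants):
--     count = 1
--     for arg in constants:
--         if arg is not None and arg != "":
--             count += 1
--     return count
--
-- def topic_status_match(constants, topic):
--     topic_split = topic.split("/")
--     if len(topic_split) != topic_status_len(constants):
--         return False
--     else:
--         constant_count = 0
--         topic_count = 0
--         for arg in constants:
--             if arg is not None and arg != "":
--                 if arg != topic_split[topic_count]:
--                     return False
--                 topic_count += 1
--             if constant_count == 0:
--                 topic_count += 1
--             constant_count += 1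
--     return True
-- ===== SOURCE B (Python) =====
-- def topic_status_match(constants, topic):
--     nonempty = [c for c in constants if c is not None and c != ""]
--     if topic.count("/") != len(nonempty):
--         return False
--     if constants and constants[0] is not None and constants[0] != "":
--         prefix = constants[0]
--         if not topic.startswith(prefix + "/"):
--             return False
--         rest = topic[len(prefix) + 1:]
--         expected = nonempty[1:]
--     else:
--         rest = topic
--         expected = nonempty
--     i = rest.find("/")
--     if not expected:
--         return i == -1
--     return i >= 0 and rest[i + 1:] == "/".join(expected)
-- ===== Notes on version B (the rewrite author's own statement) =====
-- stated objective: alternative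
-- what changed: B never splits the topic: it gates on topic.count('/') against the number of non-empty constants, checks the first constant as a string prefix with startswith, locates the single wildcard segment as the text up to the first '/' of the remainder via find, and compares the rest against '/'.join(nonempty) as one string equality, replacing A's split plus interleaved two-counter comparison loop.
import Mathlib
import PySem

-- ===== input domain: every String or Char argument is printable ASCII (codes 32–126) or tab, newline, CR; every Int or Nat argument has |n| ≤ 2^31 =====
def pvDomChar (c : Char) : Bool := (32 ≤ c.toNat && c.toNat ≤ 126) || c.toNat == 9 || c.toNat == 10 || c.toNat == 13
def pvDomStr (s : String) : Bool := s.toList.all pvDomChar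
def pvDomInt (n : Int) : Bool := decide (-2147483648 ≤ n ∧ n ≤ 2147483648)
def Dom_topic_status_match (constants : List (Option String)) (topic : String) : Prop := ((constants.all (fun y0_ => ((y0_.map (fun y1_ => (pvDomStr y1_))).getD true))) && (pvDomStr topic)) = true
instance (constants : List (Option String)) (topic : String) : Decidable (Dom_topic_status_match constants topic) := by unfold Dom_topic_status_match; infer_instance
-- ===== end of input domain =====

-- B matches the topic as a STRING (slash-count gate, startswith prefix, first-'/' wildcard via find,
-- one join equality) instead of A's split plus interleaved two-counter scan (objective: alternative).

-- ===== PORT A =====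

-- 'arg is not None and arg != ""'
def pvIsNE (arg : Option String) : Bool :=
  match arg with
  | none => false
  | some s => !(s == "")

-- helper topic_status_len: count = 1; for arg in constants: if nonempty: count += 1
def topic_status_len (constants : List (Option String)) : Nat :=
  constants.foldl (fun count arg => if pvIsNE arg then count + 1 else count) 1

-- the for-loop of A over constants, carrying topic_count and constant_count
def pvLoopA (segs : List String) : List (Option String) → Nat → Nat → Bool
  | [], _tc, _cc => true
  | arg :: rest, tc, cc =>
    if pvIsNE arg then
      match PySem.List.pyGet? segs (tc : Int) with
      | none => false  -- IndexError; unreachable: the length guard keeps topic_count in range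
      | some s =>
        if arg ≠ some s then false
        else pvLoopA segs rest ((tc + 1) + (if cc = 0 then 1 else 0)) (cc + 1)
    else pvLoopA segs rest (tc + (if cc = 0 then 1 else 0)) (cc + 1)

def topic_status_match (constants : List (Option String)) (topic : String) : Bool :=
  let topic_split := (PySem.Str.split? topic "/").getD []  -- sep "/" ≠ "": split? is always some here
  if topic_split.length ≠ topic_status_len constants then false
  else pvLoopA topic_split constants 0 0

-- ===== PORT B =====

-- the value kept by the comprehension [c for c in constants if c is not None and c != ""]
def pvNEVal (arg : Option String) : Option String :=
  match arg with
  | none => none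
  | some s => if s == "" then none else some s

-- 'constants and constants[0] is not None and constants[0] != ""': the prefix constant, if any
def pvHeadNE (constants : List (Option String)) : Option String :=
  match constants with
  | some p :: _ => if p == "" then none else some p
  | _ => none

-- i = rest.find("/"); if not expected: return i == -1; return i >= 0 and rest[i+1:] == "/".join(expected)
def pvTailMatch (rest : String) (expected : List String) : Bool :=
  let i := PySem.Str.find rest "/"
  if expected.isEmpty then i == -1
  else (0 ≤ i : Bool) && (PySem.Str.slice rest (some (i + 1)) none == PySem.Str.join "/" expected)

def topic_status_match_alt (constants : List (Option String)) (topic : String) : Bool :=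
  let nonempty := constants.filterMap pvNEVal
  if PySem.Str.count topic "/" ≠ nonempty.length then false
  else
    match pvHeadNE constants with
    | some p =>
      if !PySem.Str.startswith topic (String.ofList (p.toList ++ ['/'])) then false  -- prefix + "/"
      else pvTailMatch (PySem.Str.slice topic (some (PySem.Str.len p + 1)) none)     -- topic[len(prefix)+1:]
                       (PySem.List.slice nonempty (some (1:Int)) none)               -- nonempty[1:]
    | none => pvTailMatch topic nonempty

-- ===== PRECONDITION & SPEC =====
def Spec_topic_status_match (constants : List (Option String)) (topic : String) (out : Bool) : Prop := out = topic_status_match_alt constants topic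
instance (constants : List (Option String)) (topic : String) (out : Bool) : Decidable (Spec_topic_status_match constants topic out) := by unfold Spec_topic_status_match; infer_instance

-- ===== CLAIM (what is proved, stated in full; the proofs are below) =====
def Claim_equal_topic_status_match : Prop := ∀ (constants : List (Option String)) (topic : String), Dom_topic_status_match constants topic → Spec_topic_status_match constants topic (topic_status_match constants topic)

-- ===== LEMMAS AND PROOFS =====

def juxSep : List Char := ['/']

-- skip index of A's scan: 1 iff the first constant is kept
def pvSkip (constants : List (Option String)) : Nat :=
  match constants with
  | [] => 0
  | c0 :: _ => if pvIsNE c0 then 1 else 0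

def mySplit : List Char → List (List Char)
  | [] => [[]]
  | c :: t =>
    if c = '/' then [] :: mySplit t
    else
      match mySplit t with
      | [] => [[c]]
      | h :: r => (c :: h) :: r

theorem mySplit_ne_nil (cs : List Char) : mySplit cs ≠ [] := by
  cases cs with
  | nil => simp [mySplit]
  | cons c t =>
    simp only [mySplit]
    split
    · simp
    · split <;> simp

theorem splitOn_go_spec (l : List Char) : ∀ (fuel : Nat) (cur : List Char) (acc : List (List Char)),
    l.length ≤ fuel →
    PySem.Chars.splitOn.go ['/'] fuel l cur acc =
      acc.reverse ++ (match mySplit l with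
        | [] => []
        | h :: r => (cur.reverse ++ h) :: r) := by
  induction l with
  | nil =>
    intro fuel cur acc _
    cases fuel <;> simp [PySem.Chars.splitOn.go, mySplit]
  | cons c t ih =>
    intro fuel cur acc hf
    cases fuel with
    | zero => simp at hf
    | succ fuel =>
      simp only [PySem.Chars.splitOn.go]
      simp only [List.length_cons] at hf
      by_cases hc : c = '/'
      · subst hc
        rw [if_pos (by simp [List.isPrefixOf])]
        simp only [List.length_cons, List.length_nil, List.drop_succ_cons, List.drop_zero]
        rw [ih fuel [] (cur.reverse :: acc) (by omega)]
        cases hms : mySplit t with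
        | nil => exact absurd hms (mySplit_ne_nil t)
        | cons h r =>
          simp [mySplit, hms]
      · rw [if_neg (by simp [List.isPrefixOf, Ne.symm hc, beq_eq_false_iff_ne, hc])]
        rw [ih fuel (c :: cur) acc (by omega)]
        cases hms : mySplit t with
        | nil => exact absurd hms (mySplit_ne_nil t)
        | cons h r =>
          simp [mySplit, hms, hc]

theorem splitOn_eq_mySplit (cs : List Char) : PySem.Chars.splitOn cs ['/'] = mySplit cs := by
  unfold PySem.Chars.splitOn
  rw [splitOn_go_spec cs (cs.length + 1) [] [] (by omega)]
  cases hms : mySplit cs with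
  | nil => exact absurd hms (mySplit_ne_nil cs)
  | cons h r => simp

theorem count_go_spec (l : List Char) : ∀ (fuel : Nat) (acc : Nat), l.length ≤ fuel →
    PySem.Chars.count.go ['/'] fuel l acc = acc + l.count '/' := by
  induction l with
  | nil => intro fuel acc _; cases fuel <;> simp [PySem.Chars.count.go]
  | cons c t ih =>
    intro fuel acc hf
    cases fuel with
    | zero => simp at hf
    | succ fuel =>
      simp only [PySem.Chars.count.go]
      simp only [List.length_cons] at hf
      by_cases hc : c = '/'
      · subst hc
        rw [if_pos (by simp [List.isPrefixOf])]
        simp only [List.length_cons, List.length_nil, List.drop_succ_cons, List.drop_zero]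
        rw [ih fuel (acc + 1) (by omega)]
        simp [List.count_cons]
        omega
      · rw [if_neg (by simp [List.isPrefixOf]; exact fun hh => hc hh.symm)]
        rw [ih fuel acc (by omega)]
        rw [List.count_cons, if_neg (by simp [hc])]
        omega

theorem count_slash (cs : List Char) : PySem.Chars.count cs ['/'] = cs.count '/' := by
  unfold PySem.Chars.count
  rw [if_neg (by simp)]
  simpa using count_go_spec cs cs.length 0 (le_refl _)

def myJoin : List (List Char) → List Char
  | [] => []
  | [x] => x
  | x :: y :: r => x ++ '/' :: myJoin (y :: r)

theorem intercalate_eq_myJoin (l : List (List Char)) : ['/'].intercalate l = myJoin l := by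
  induction l with
  | nil => simp [myJoin, List.intercalate]
  | cons x r ih =>
    cases r with
    | nil => simp [myJoin, List.intercalate]
    | cons y r2 =>
      simp [List.intercalate, List.intersperse] at ih ⊢
      simp [myJoin, ← ih]

theorem length_mySplit (cs : List Char) : (mySplit cs).length = cs.count '/' + 1 := by
  induction cs with
  | nil => simp [mySplit]
  | cons c t ih =>
    by_cases hc : c = '/'
    · subst hc; simp [mySplit, List.count_cons, ih]
    · cases hms : mySplit t with
      | nil => exact absurd hms (mySplit_ne_nil t)
      | cons h r =>
        rw [hms] at ih
        simp only [mySplit, hc, if_false, hms]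
        simp only [List.length_cons] at ih ⊢
        rw [List.count_cons, if_neg (by simp [hc])]
        omega

theorem mySplit_no_slash (w : List Char) (h : '/' ∉ w) : mySplit w = [w] := by
  induction w with
  | nil => simp [mySplit]
  | cons c t ih =>
    simp only [List.mem_cons, not_or] at h
    simp [mySplit, Ne.symm h.1, ih h.2]

theorem mySplit_append (p r : List Char) (h : '/' ∉ p) :
    mySplit (p ++ '/' :: r) = p :: mySplit r := by
  induction p with
  | nil => simp [mySplit]
  | cons c t ih =>
    simp only [List.mem_cons, not_or] at h
    rw [List.cons_append]
    simp only [mySplit, ih h.2]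
    simp [Ne.symm h.1]

theorem myJoin_mySplit (cs : List Char) : myJoin (mySplit cs) = cs := by
  induction cs with
  | nil => simp [mySplit, myJoin]
  | cons c t ih =>
    by_cases hc : c = '/'
    · subst hc
      simp only [mySplit, if_pos rfl]
      cases hms : mySplit t with
      | nil => exact absurd hms (mySplit_ne_nil t)
      | cons h r =>
        rw [hms] at ih
        simp [myJoin, ih]
    · cases hms : mySplit t with
      | nil => exact absurd hms (mySplit_ne_nil t)
      | cons h r =>
        rw [hms] at ih
        simp only [mySplit, hc, if_false, hms]
        cases r with
        | nil => simp_all [myJoin]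
        | cons h2 r2 =>
          simp [myJoin] at ih ⊢
          simpa using ih

theorem count_myJoin (lst : List (List Char)) (h : lst ≠ []) :
    (myJoin lst).count '/' + 1 = (lst.map (fun p => p.count '/')).sum + lst.length := by
  induction lst with
  | nil => simp at h
  | cons x r ih =>
    cases r with
    | nil => simp [myJoin]
    | cons y r2 =>
      have := ih (by simp)
      simp only [myJoin, List.count_append, List.count_cons, List.map_cons, List.sum_cons,
        List.length_cons] at this ⊢
      simp at this ⊢
      omega

theorem mySplit_myJoin_of_flat (lst : List (List Char)) (hne : lst ≠ [])
    (hsum : (lst.map (fun p => p.count '/')).sum = 0) : mySplit (myJoin lst) = lst := by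
  induction lst with
  | nil => exact absurd rfl hne
  | cons x rest ih =>
    simp only [List.map_cons, List.sum_cons, Nat.add_eq_zero_iff] at hsum
    have hx : '/' ∉ x := by
      intro hmem
      have := List.count_pos_iff.mpr hmem
      omega
    cases rest with
    | nil => simp [myJoin, mySplit_no_slash x hx]
    | cons y r2 =>
      have hrec := ih (by simp) hsum.2
      simp only [myJoin] at hrec ⊢
      rw [mySplit_append x _ hx, hrec]

theorem key_join (r : List Char) (lst : List (List Char))
    (hlen : r.count '/' + 1 = lst.length) :
    (r = myJoin lst) ↔ mySplit r = lst := by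
  constructor
  · intro hr
    subst hr
    have hne : lst ≠ [] := by intro h; subst h; simp at hlen
    have hsum : (lst.map (fun p => p.count '/')).sum = 0 := by
      have := count_myJoin lst hne
      omega
    exact mySplit_myJoin_of_flat lst hne hsum
  · intro h
    rw [← h, myJoin_mySplit]

theorem find_go_no_slash (l : List Char) (k : Nat) (h : '/' ∉ l) :
    PySem.Chars.find.go ['/'] l k = -1 := by
  induction l generalizing k with
  | nil => simp [PySem.Chars.find.go]
  | cons c t ih =>
    simp only [List.mem_cons, not_or] at h
    simp only [PySem.Chars.find.go]
    rw [if_neg (by simp [List.isPrefixOf]; exact h.1)]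
    exact ih (k+1) h.2

theorem find_go_decomp (w : List Char) (r : List Char) (k : Nat) (h : '/' ∉ w) :
    PySem.Chars.find.go ['/'] (w ++ '/' :: r) k = (k : Int) + w.length := by
  induction w generalizing k with
  | nil =>
    simp only [List.nil_append, PySem.Chars.find.go]
    rw [if_pos (by simp [List.isPrefixOf])]
    simp
  | cons c t ih =>
    simp only [List.mem_cons, not_or] at h
    simp only [List.cons_append, PySem.Chars.find.go]
    rw [if_neg (by simp [List.isPrefixOf]; exact h.1)]
    rw [ih (k+1) h.2]
    simp
    omega

-- ==== decomposition at the first slash & glue lemmas ====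

theorem first_slash_decomp (cs : List Char) (h : '/' ∈ cs) :
    ∃ w r, cs = w ++ '/' :: r ∧ '/' ∉ w := by
  induction cs with
  | nil => simp at h
  | cons c t ih =>
    by_cases hc : c = '/'
    · exact ⟨[], t, by simp [hc], by simp⟩
    · have ht : '/' ∈ t := by
        rcases List.mem_cons.mp h with h1 | h1
        · exact absurd h1.symm hc
        · exact h1
      obtain ⟨w, r, hwr, hw⟩ := ih ht
      exact ⟨c :: w, r, by simp [hwr], by simp [Ne.symm hc, hw]⟩

theorem slash_decomp_unique (w r w' r' : List Char) (hw : '/' ∉ w) (hw' : '/' ∉ w')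
    (h : w ++ '/' :: r = w' ++ '/' :: r') : w = w' ∧ r = r' := by
  have h1 := congrArg mySplit h
  rw [mySplit_append w r hw, mySplit_append w' r' hw'] at h1
  have h2 : w = w' := by injection h1
  have h3 : mySplit r = mySplit r' := by injection h1
  have h4 : r = r' := by
    have := congrArg myJoin h3
    rwa [myJoin_mySplit, myJoin_mySplit] at this
  exact ⟨h2, h4⟩

theorem find_no_slash (cs : List Char) (h : '/' ∉ cs) : PySem.Chars.find cs ['/'] = -1 :=
  find_go_no_slash cs 0 h

theorem find_decomp (w r : List Char) (h : '/' ∉ w) :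
    PySem.Chars.find (w ++ '/' :: r) ['/'] = (w.length : Int) := by
  simpa using find_go_decomp w r 0 h

theorem count_decomp (w r : List Char) (h : '/' ∉ w) :
    (w ++ '/' :: r).count '/' = r.count '/' + 1 := by
  rw [List.count_append, List.count_cons]
  simp [List.count_eq_zero.mpr h]

theorem myJoin_count_ge (lst : List (List Char)) (h : lst ≠ []) :
    lst.length ≤ (myJoin lst).count '/' + 1 := by
  have := count_myJoin lst h
  omega

theorem map_ofList_beq (xs : List (List Char)) (ys : List String) :
    ((xs.map String.ofList) == ys) = true ↔ xs = ys.map String.toList := by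
  rw [beq_iff_eq]
  constructor
  · intro h
    have := congrArg (List.map String.toList) h
    simpa [List.map_map, Function.comp_def] using this
  · intro h
    subst h
    simp [List.map_map, Function.comp_def]

theorem str_count_eq (topic : String) : PySem.Str.count topic "/" = topic.toList.count '/' := by
  rw [show PySem.Str.count topic "/" = PySem.Chars.count topic.toList ['/'] from rfl]
  exact count_slash topic.toList

theorem split?_eq (topic : String) :
    (PySem.Str.split? topic "/").getD [] = (mySplit topic.toList).map String.ofList := by
  rw [show PySem.Str.split? topic "/"
      = Option.map (List.map String.ofList) (PySem.Chars.split? topic.toList ['/']) from rfl]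
  rw [PySem.Chars.split?]
  rw [if_neg (by simp)]
  rw [splitOn_eq_mySplit]
  rfl

theorem slice_toList (s : String) (k : Nat) :
    (PySem.Str.slice s (some (k : Int)) none).toList = s.toList.drop k := by
  simp [PySem.List.slice_from_natCast]

theorem join_toList (parts : List String) :
    (PySem.Str.join "/" parts).toList = myJoin (parts.map String.toList) := by
  rw [show (PySem.Str.join "/" parts).toList
      = PySem.Chars.join juxSep (parts.map String.toList) from by simp [PySem.Str.join]; rfl]
  rw [show PySem.Chars.join juxSep (parts.map String.toList)
      = List.intercalate ['/'] (parts.map String.toList) from rfl]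
  exact intercalate_eq_myJoin _

-- ==== pvTailMatch characterisation ====

theorem tailMatch_nil (rest : String) : pvTailMatch rest [] = decide ('/' ∉ rest.toList) := by
  unfold pvTailMatch
  rw [if_pos (by simp)]
  by_cases h : '/' ∈ rest.toList
  · obtain ⟨w, r, hwr, hw⟩ := first_slash_decomp rest.toList h
    rw [show PySem.Str.find rest "/" = PySem.Chars.find rest.toList ['/'] from rfl, hwr,
      find_decomp w r hw]
    simp [h, hwr]
  · rw [show PySem.Str.find rest "/" = PySem.Chars.find rest.toList ['/'] from rfl,
      find_no_slash rest.toList h]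
    simp [h]

theorem tailMatch_true_iff (rest : String) (expected : List String) (hne : expected ≠ []) :
    pvTailMatch rest expected = true ↔
      ∃ w r, rest.toList = w ++ '/' :: r ∧ '/' ∉ w ∧
        r = myJoin (expected.map String.toList) := by
  unfold pvTailMatch
  rw [if_neg (by simp [hne])]
  by_cases h : '/' ∈ rest.toList
  · obtain ⟨w, r, hwr, hw⟩ := first_slash_decomp rest.toList h
    rw [show PySem.Str.find rest "/" = PySem.Chars.find rest.toList ['/'] from rfl, hwr,
      find_decomp w r hw]
    rw [show ((w.length : Int) + 1) = ((w.length + 1 : Nat) : Int) from by push_cast; ring]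
    constructor
    · intro hb
      simp only [Bool.and_eq_true, decide_eq_true_eq, beq_iff_eq] at hb
      refine ⟨w, r, rfl, hw, ?_⟩
      have := congrArg String.toList hb.2
      rw [slice_toList, join_toList, hwr] at this
      simpa [List.drop_append_of_le_length, List.drop_length] using this
    · rintro ⟨w', r', hwr', hw', hr'⟩
      obtain ⟨hweq, hreq⟩ := slash_decomp_unique w r w' r' hw hw' hwr'
      subst hweq hreq
      simp only [Bool.and_eq_true, decide_eq_true_eq, beq_iff_eq]
      refine ⟨by positivity, ?_⟩
      apply String.toList_inj.mp
      rw [slice_toList, join_toList, hwr]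
      simpa [List.drop_append_of_le_length, List.drop_length] using hr'
  · rw [show PySem.Str.find rest "/" = PySem.Chars.find rest.toList ['/'] from rfl,
      find_no_slash rest.toList h]
    constructor
    · intro hb
      simp at hb
    · rintro ⟨w', r', hwr', hw', hr'⟩
      exact absurd (by simp [hwr'] : '/' ∈ rest.toList) h

-- ==== pvHeadNE glue ====

theorem headNE_none_skip (constants : List (Option String)) (h : pvHeadNE constants = none) :
    pvSkip constants = 0 := by
  cases constants with
  | nil => rfl
  | cons c0 rest =>
    cases c0 with
    | none => simp [pvSkip, pvIsNE]
    | some s =>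
      by_cases hs : s == ""
      · have hs' : s = "" := by simpa using hs
        simp [pvSkip, pvIsNE, hs']
      · simp [pvHeadNE, hs] at h

theorem headNE_some_shape (constants : List (Option String)) (p : String)
    (h : pvHeadNE constants = some p) :
    ∃ rest, constants = some p :: rest ∧ (p == "") = false := by
  cases constants with
  | nil => simp [pvHeadNE] at h
  | cons c0 rest =>
    cases c0 with
    | none => simp [pvHeadNE] at h
    | some s =>
      by_cases hs : s == ""
      · simp [pvHeadNE, hs] at h
      · simp only [pvHeadNE, hs, Bool.false_eq_true, if_false, Option.some.injEq] at h
        exact ⟨rest, by rw [h], by rw [← h]; simpa using hs⟩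

-- ==== A-side characterisation (as in the previous development) ====

def pvCmpFrom (segs : List String) : List String → Nat → Bool
  | [], _ => true
  | x :: xs, tc =>
    match segs[tc]? with
    | none => false
    | some s => (x == s) && pvCmpFrom segs xs (tc + 1)

theorem pvNEVal_of_isNE (arg : Option String) (h : pvIsNE arg = true) :
    ∃ s, arg = some s ∧ pvNEVal arg = some s := by
  cases arg with
  | none => simp [pvIsNE] at h
  | some s =>
    refine ⟨s, rfl, ?_⟩
    simp [pvIsNE] at h
    simp [pvNEVal, h]

theorem pvNEVal_of_not_isNE (arg : Option String) (h : pvIsNE arg = false) :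
    pvNEVal arg = none := by
  cases arg with
  | none => simp [pvNEVal]
  | some s =>
    simp [pvIsNE] at h
    simp [pvNEVal, h]

theorem topic_status_len_aux (constants : List (Option String)) (k : Nat) :
    constants.foldl (fun count arg => if pvIsNE arg then count + 1 else count) k
      = (constants.filterMap pvNEVal).length + k := by
  induction constants generalizing k with
  | nil => simp
  | cons arg rest ih =>
    by_cases h : pvIsNE arg = true
    · obtain ⟨s, hs, hv⟩ := pvNEVal_of_isNE arg h
      simp [List.foldl_cons, h, ih, hv]
      omega
    · simp at h
      simp [List.foldl_cons, h, ih, pvNEVal_of_not_isNE arg h]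

theorem topic_status_len_eq (constants : List (Option String)) :
    topic_status_len constants = (constants.filterMap pvNEVal).length + 1 := by
  simpa [topic_status_len] using topic_status_len_aux constants 1

theorem pvLoopA_tail (segs : List String) (cs : List (Option String)) (tc cc : Nat) (h : cc ≠ 0) :
    pvLoopA segs cs tc cc = pvCmpFrom segs (cs.filterMap pvNEVal) tc := by
  induction cs generalizing tc cc with
  | nil => simp [pvLoopA, pvCmpFrom]
  | cons arg rest ih =>
    by_cases hne : pvIsNE arg = true
    · obtain ⟨s, hs, hv⟩ := pvNEVal_of_isNE arg hne
      simp only [pvLoopA, hne, if_true, List.filterMap_cons, hv, pvCmpFrom,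
        PySem.List.pyGet?_natCast]
      cases hget : segs[tc]? with
      | none => rfl
      | some t =>
        by_cases heq : s = t
        · subst heq
          simp [hs, h]
          exact ih _ _ (by omega)
        · simp [hs, heq]
    · simp only [Bool.not_eq_true] at hne
      simp only [pvLoopA, hne, List.filterMap_cons, pvNEVal_of_not_isNE arg hne, h,
        if_false]
      simpa using ih (tc + 0) (cc + 1) (by omega)

theorem pvCmpFrom_eq (segs ne : List String) (tc : Nat)
    (h : tc + ne.length = segs.length) :
    pvCmpFrom segs ne tc = (segs.drop tc == ne) := by
  induction ne generalizing tc with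
  | nil =>
    simp only [List.length_nil, Nat.add_zero] at h
    simp [pvCmpFrom, h, List.drop_length]
  | cons x xs ih =>
    have htc : tc < segs.length := by simp at h; omega
    have hdrop : segs.drop tc = segs[tc] :: segs.drop (tc + 1) :=
      List.drop_eq_getElem_cons htc
    simp only [pvCmpFrom, List.getElem?_eq_getElem htc, hdrop, List.cons_beq_cons]
    rw [ih (tc + 1) (by simp at h ⊢; omega), BEq.comm]

theorem pvCore (constants : List (Option String)) (segs : List String)
    (hlen : segs.length = (constants.filterMap pvNEVal).length + 1) :
    pvLoopA segs constants 0 0 =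
      ((segs.take (pvSkip constants) ++ segs.drop (pvSkip constants + 1))
        == constants.filterMap pvNEVal) := by
  cases constants with
  | nil =>
    have hdrop : segs.drop 1 = [] := List.drop_eq_nil_of_le (by simp at hlen; omega)
    simp [pvLoopA, pvSkip, hdrop]
  | cons c0 rest =>
    cases segs with
    | nil => simp at hlen
    | cons a t =>
      by_cases h0 : pvIsNE c0 = true
      · obtain ⟨s, hs, hv⟩ := pvNEVal_of_isNE c0 h0
        have hnecons : (c0 :: rest).filterMap pvNEVal = s :: rest.filterMap pvNEVal := by
          simp [hv]
        have hskip : pvSkip (c0 :: rest) = 1 := by simp [pvSkip, h0]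
        rw [hnecons] at hlen ⊢
        rw [hskip]
        have hget : PySem.List.pyGet? (a :: t) (((0:Nat)):Int) = some a := by
          simp
        have htail : pvLoopA (a :: t) rest 2 1 = (t.tail == rest.filterMap pvNEVal) := by
          rw [pvLoopA_tail (a :: t) rest 2 1 (by omega)]
          rw [pvCmpFrom_eq (a :: t) (rest.filterMap pvNEVal) 2 (by simp at hlen ⊢; omega)]
          simp [List.drop_one]
        simp only [pvLoopA, h0, if_true, hget]
        by_cases hsa : s = a
        · subst hsa
          rw [if_neg (by simp [hs])]
          simp [htail]
        · rw [if_pos (by simp [hs, hsa])]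
          simp [Ne.symm hsa]
      · simp only [Bool.not_eq_true] at h0
        have hnerest : (c0 :: rest).filterMap pvNEVal = rest.filterMap pvNEVal := by
          simp [pvNEVal_of_not_isNE c0 h0]
        have hskip : pvSkip (c0 :: rest) = 0 := by simp [pvSkip, h0]
        rw [hnerest] at hlen ⊢
        rw [hskip]
        have htail : pvLoopA (a :: t) rest 1 1 = (t == rest.filterMap pvNEVal) := by
          rw [pvLoopA_tail (a :: t) rest 1 1 (by omega)]
          rw [pvCmpFrom_eq (a :: t) (rest.filterMap pvNEVal) 1 (by simp at hlen ⊢; omega)]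
          simp
        simp only [pvLoopA, h0, Bool.false_eq_true, if_false]
        simp [htail]


theorem startswith_iff (topic p : String) :
    PySem.Str.startswith topic (String.ofList (p.toList ++ ['/'])) = true ↔
      ∃ r, topic.toList = p.toList ++ '/' :: r := by
  rw [show PySem.Str.startswith topic (String.ofList (p.toList ++ ['/']))
      = (p.toList ++ ['/']).isPrefixOf topic.toList from by
        simp [PySem.Str.startswith, PySem.Chars.startswith]]
  rw [List.isPrefixOf_iff_prefix]
  constructor
  · rintro ⟨t, ht⟩
    exact ⟨t, by rw [← ht]; simp⟩
  · rintro ⟨r, hr⟩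
    exact ⟨r, by rw [hr]; simp⟩

theorem slice_p_toList (topic p : String) :
    (PySem.Str.slice topic (some (PySem.Str.len p + 1)) none).toList
      = topic.toList.drop (p.toList.length + 1) := by
  rw [show PySem.Str.len p + 1 = ((p.toList.length + 1 : Nat) : Int) from by
    simp [PySem.Str.len]]
  exact slice_toList topic _

theorem drop_prefix_slash (a b : List Char) : (a ++ '/' :: b).drop (a.length + 1) = b := by
  rw [show a ++ '/' :: b = (a ++ ['/']) ++ b from by simp,
    show a.length + 1 = (a ++ ['/']).length from by simp]
  exact List.drop_left

-- both ports agree on the tail: the wildcard is the first segment of `topic`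
theorem case_none (cs : List Char) (topic : String) (ne : List String)
    (hcs : topic.toList = cs) (hgate : cs.count '/' = ne.length) :
    (((mySplit cs).map String.ofList).drop 1 == ne) = pvTailMatch topic ne := by
  cases hnel : ne with
  | nil =>
    rw [tailMatch_nil, hcs]
    have hnos : '/' ∉ cs := List.count_eq_zero.mp (by rw [hgate, hnel]; rfl)
    rw [mySplit_no_slash cs hnos]
    simp [hnos]
  | cons s t =>
    rw [← hnel]
    apply Bool.eq_iff_iff.mpr
    rw [tailMatch_true_iff topic ne (by simp [hnel]), hcs]
    have hslash : '/' ∈ cs := by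
      have : 0 < cs.count '/' := by rw [hgate, hnel]; simp
      exact List.count_pos_iff.mp this
    obtain ⟨w, r, hdec, hw⟩ := first_slash_decomp cs hslash
    rw [hdec, mySplit_append w r hw]
    simp only [List.map_cons, List.drop_succ_cons, List.drop_zero]
    rw [map_ofList_beq]
    have hcount : r.count '/' + 1 = (ne.map String.toList).length := by
      rw [hdec, count_decomp w r hw] at hgate
      simp only [List.length_map]
      omega
    constructor
    · intro hA
      exact ⟨w, r, rfl, hw, (key_join r _ hcount).mpr hA⟩
    · rintro ⟨w', r', heq, hw', hr'⟩
      obtain ⟨hweq, hreq⟩ := slash_decomp_unique w r w' r' hw hw' heq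
      subst hweq hreq
      exact (key_join r _ hcount).mp hr'

-- ===== VERDICT (by name: the statement is the Claim_ definition above) =====
theorem topic_status_match_spec : Claim_equal_topic_status_match := by
  intro constants topic _dom
  unfold Spec_topic_status_match topic_status_match topic_status_match_alt
  rw [topic_status_len_eq, split?_eq, str_count_eq]
  by_cases hgate : topic.toList.count '/' = (constants.filterMap pvNEVal).length
  · rw [if_neg (by simp only [List.length_map, length_mySplit]; omega),
      if_neg (by omega)]
    rw [pvCore constants _ (by simp only [List.length_map, length_mySplit]; omega)]
    cases hh : pvHeadNE constants with
    | none =>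
      rw [headNE_none_skip constants hh]
      simp only [List.take_zero, List.nil_append, Nat.zero_add]
      exact case_none topic.toList topic (constants.filterMap pvNEVal) rfl hgate
    | some p =>
      obtain ⟨rest, hconsts, hpne⟩ := headNE_some_shape constants p hh
      subst hconsts
      have hskip : pvSkip (some p :: rest) = 1 := by simp [pvSkip, pvIsNE, hpne]
      rw [hskip]
      have hvp : pvNEVal (some p) = some p := by simp [pvNEVal, hpne]
      have hneform : (some p :: rest).filterMap pvNEVal = p :: rest.filterMap pvNEVal := by
        simp only [List.filterMap_cons, hvp]
      rw [hneform]
      rw [hneform] at hgate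
      change _ = if (!PySem.Str.startswith topic (String.ofList (p.toList ++ ['/']))) = true
          then false
          else pvTailMatch (PySem.Str.slice topic (some (PySem.Str.len p + 1)) none)
            (PySem.List.slice (p :: rest.filterMap pvNEVal) (some (1:Int)) none)
      rw [show PySem.List.slice (p :: rest.filterMap pvNEVal) (some (1:Int)) none
          = rest.filterMap pvNEVal from by
        simpa using PySem.List.slice_from_natCast (p :: rest.filterMap pvNEVal) 1]
      simp only [List.length_cons] at hgate
      have hslash : '/' ∈ topic.toList := by
        have : 0 < topic.toList.count '/' := by omega
        exact List.count_pos_iff.mp this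
      obtain ⟨w, r, hdec, hw⟩ := first_slash_decomp topic.toList hslash
      by_cases pb : PySem.Str.startswith topic (String.ofList (p.toList ++ ['/'])) = true
      · rw [pb]
        simp only [Bool.not_true, Bool.false_eq_true, if_false]
        obtain ⟨r2, hcs2⟩ := (startswith_iff topic p).mp pb
        by_cases hp : '/' ∈ p.toList
        · -- the first constant itself contains '/': both sides come out false
          have hA : (((mySplit topic.toList).map String.ofList).take 1
              ++ ((mySplit topic.toList).map String.ofList).drop (1+1)
              == p :: rest.filterMap pvNEVal) = false := by
            rw [hdec, mySplit_append w r hw]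
            simp only [List.map_cons, List.take_succ_cons, List.take_zero,
              List.drop_succ_cons, List.cons_append, List.nil_append, List.cons_beq_cons]
            have hof : (String.ofList w == p) = false := by
              rw [beq_eq_false_iff_ne]
              intro hwp
              have hwp' : w = p.toList := by
                have := congrArg String.toList hwp
                simpa using this
              exact hw (hwp' ▸ hp)
            simp [hof]
          rw [hA]
          have hgate2 : p.toList.count '/' + 1 + r2.count '/'
              = (rest.filterMap pvNEVal).length + 1 := by
            rw [hcs2, List.count_append, List.count_cons] at hgate
            simp at hgate
            omega
          have hppos : 0 < p.toList.count '/' := List.count_pos_iff.mpr hp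
          cases hne2 : rest.filterMap pvNEVal with
          | nil =>
            exfalso
            rw [hne2] at hgate2
            simp at hgate2
            omega
          | cons s2 t2 =>
            rw [← hne2]
            symm
            rw [← Bool.not_eq_true]
            rw [tailMatch_true_iff _ _ (by simp [hne2])]
            rintro ⟨w2, r3, hd3, hw3, hr3⟩
            rw [slice_p_toList, hcs2, drop_prefix_slash] at hd3
            have hb1 : (rest.filterMap pvNEVal).length
                ≤ (myJoin ((rest.filterMap pvNEVal).map String.toList)).count '/' + 1 := by
              have := myJoin_count_ge ((rest.filterMap pvNEVal).map String.toList)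
                (by simp [hne2])
              simpa using this
            rw [← hr3] at hb1
            rw [hd3, count_decomp w2 r3 hw3] at hgate2
            omega
        · -- '/' ∉ p: the checked prefix is exactly the first segment
          obtain ⟨hweq, hreq⟩ := slash_decomp_unique w r p.toList r2 hw hp
            (by rw [← hdec, ← hcs2])
          subst hreq
          rw [hdec, mySplit_append w r hw]
          simp only [List.map_cons, List.take_succ_cons, List.take_zero,
            List.drop_succ_cons, List.cons_append, List.nil_append, List.cons_beq_cons]
          have hofw : (String.ofList w == p) = true := by
            rw [beq_iff_eq, hweq]
            apply String.toList_inj.mp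
            simp
          rw [hofw, Bool.true_and]
          have hrt : (PySem.Str.slice topic (some (PySem.Str.len p + 1)) none).toList = r := by
            rw [slice_p_toList, hcs2, ← hweq, drop_prefix_slash]
          have hrcount : r.count '/' = (rest.filterMap pvNEVal).length := by
            rw [hdec, count_decomp w r hw] at hgate
            omega
          exact case_none r _ (rest.filterMap pvNEVal) hrt hrcount
      · -- startswith failed: the first segment is not `p`, both sides are false
        simp only [Bool.not_eq_true] at pb
        rw [pb]
        simp only [Bool.not_false, if_true]
        rw [hdec, mySplit_append w r hw]
        simp only [List.map_cons, List.take_succ_cons, List.take_zero,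
          List.drop_succ_cons, List.cons_append, List.nil_append, List.cons_beq_cons]
        have hof : (String.ofList w == p) = false := by
          rw [beq_eq_false_iff_ne]
          intro hwp
          have hwp' : w = p.toList := by
            have := congrArg String.toList hwp
            simpa using this
          have : PySem.Str.startswith topic (String.ofList (p.toList ++ ['/'])) = true :=
            (startswith_iff topic p).mpr ⟨r, by rw [hdec, hwp']⟩
          rw [pb] at this
          exact Bool.false_ne_true this
        simp [hof]
  · rw [if_pos (by simp only [List.length_map, length_mySplit]; omega), if_pos (by omega)]
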